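-- pv_equiv track=rewrite | github.com/DiegoCruz00/practicing-with-python | Introduction to Python/rectangles.py | amountOfRectangles
-- ===== SOURCE A (Python) =====
-- def amountOfRectangles(xLength, yLength):
--
--    def rectangleInsideArea(length, height):
--       return (length <= xLength - 1) \
--          and (height <= yLength - 1)
--
--    total = 0
--
--    for comparingXSize in range(1, xLength):
--       for comparingYSize in range(1, yLength):
--          for x in range(xLength - 1):
--             for y in range(yLength - 1):
--                if rectangleInsideArea(x + comparingXSize, y + comparingYSize):
--                   total += 1
--                else: break
--
--    return total
-- ===== SOURCE B (Python) =====
-- def amountOfRectangles(xLength, yLength):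
--     # Closed form: sum over widths 1..xLength-1 of (xLength-w) is a triangular
--     # number, independently for each axis; the total is their product.
--     if xLength < 2 or yLength < 2:
--         return 0
--     return (xLength * (xLength - 1) // 2) * (yLength * (yLength - 1) // 2)
-- ===== Notes on version B (the rewrite author's own statement) =====
-- stated objective: faster
-- what changed: Replaced the four nested loops with the closed-form product of the two triangular numbers x(x-1)/2 * y(y-1)/2.
import Mathlib
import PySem

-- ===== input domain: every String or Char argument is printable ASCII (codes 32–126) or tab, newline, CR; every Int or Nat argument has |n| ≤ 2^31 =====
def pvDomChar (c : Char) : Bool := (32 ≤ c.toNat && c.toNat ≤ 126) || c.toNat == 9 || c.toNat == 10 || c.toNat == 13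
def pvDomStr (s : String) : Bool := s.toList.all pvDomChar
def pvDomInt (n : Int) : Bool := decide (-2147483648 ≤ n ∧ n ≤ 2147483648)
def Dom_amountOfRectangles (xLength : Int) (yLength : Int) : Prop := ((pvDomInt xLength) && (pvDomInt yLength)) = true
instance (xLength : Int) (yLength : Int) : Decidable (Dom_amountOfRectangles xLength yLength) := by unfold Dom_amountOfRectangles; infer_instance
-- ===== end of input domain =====

-- B replaces A's four nested counting loops by the closed-form product of two
-- triangular numbers (objective: faster, asymptotically).

-- ===== PORT A =====
-- the innermost 'for y in …: if …: total += 1 else: break' loop of A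
def loopYA (xL yL cx cy x : Int) : List Int → Int → Int
  | [], t => t
  | y :: ys, t =>
      if x + cx ≤ xL - 1 ∧ y + cy ≤ yL - 1 then loopYA xL yL cx cy x ys (t + 1) else t

def amountOfRectangles (xLength : Int) (yLength : Int) : Int :=
  (PySem.List.pyRange 1 xLength 1).foldl (fun t cx =>
    (PySem.List.pyRange 1 yLength 1).foldl (fun t2 cy =>
      (PySem.List.pyRange 0 (xLength - 1) 1).foldl (fun t3 x =>
        loopYA xLength yLength cx cy x (PySem.List.pyRange 0 (yLength - 1) 1) t3) t2) t) 0

-- ===== PORT B =====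
def amountOfRectangles_alt (xLength : Int) (yLength : Int) : Int :=
  if xLength < 2 || yLength < 2 then 0
  else PySem.Int.floordiv (xLength * (xLength - 1)) 2 *
       PySem.Int.floordiv (yLength * (yLength - 1)) 2

-- ===== PRECONDITION & SPEC =====
def Spec_amountOfRectangles (xLength : Int) (yLength : Int) (out : Int) : Prop := out = amountOfRectangles_alt xLength yLength
instance (xLength : Int) (yLength : Int) (out : Int) : Decidable (Spec_amountOfRectangles xLength yLength out) := by unfold Spec_amountOfRectangles; infer_instance

-- ===== CLAIM (what is proved, stated in full; the proofs are below) =====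
def Claim_equal_amountOfRectangles : Prop := ∀ (xLength : Int) (yLength : Int), Dom_amountOfRectangles xLength yLength → Spec_amountOfRectangles xLength yLength (amountOfRectangles xLength yLength)

-- ===== LEMMAS AND PROOFS =====

-- when the x-part of the guard fails, the y-loop breaks immediately
lemma loopYA_stop (xL yL cx cy x : Int) (h : ¬ x + cx ≤ xL - 1) :
    ∀ (ys : List Int) (t : Int), loopYA xL yL cx cy x ys t = t := by
  intro ys t
  cases ys with
  | nil => rfl
  | cons y ys => simp [loopYA, h]

-- when the x-part holds, the y-loop counts the prefix of [a, m) below yL - cy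
lemma loopYA_count (xL yL cx cy x m : Int) (h : x + cx ≤ xL - 1) :
    ∀ (n : Nat) (a t : Int), (m - a).toNat = n →
      loopYA xL yL cx cy x (PySem.List.pyRange a m 1) t
        = t + max 0 (min m (yL - cy) - a) := by
  intro n
  induction n with
  | zero =>
      intro a t hn
      rw [PySem.List.pyRange_one_eq_nil (by omega)]
      simp [loopYA]; omega
  | succ k ih =>
      intro a t hn
      rw [PySem.List.pyRange_one_cons (by omega)]
      by_cases hy : a + cy ≤ yL - 1
      · simp only [loopYA, if_pos (And.intro h hy)]
        rw [ih (a + 1) (t + 1) (by omega)]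
        omega
      · simp only [loopYA, if_neg (by tauto : ¬ (x + cx ≤ xL - 1 ∧ a + cy ≤ yL - 1))]
        omega

-- the innermost loop's value, unconditionally in x
lemma loopYA_val (xL yL cx cy x t : Int) :
    loopYA xL yL cx cy x (PySem.List.pyRange 0 (yL - 1) 1) t
      = t + (if x + cx ≤ xL - 1 then max 0 (min (yL - 1) (yL - cy)) else 0) := by
  by_cases h : x + cx ≤ xL - 1
  · rw [if_pos h, loopYA_count xL yL cx cy x (yL - 1) h (yL - 1 - 0).toNat 0 t rfl]
    omega
  · rw [if_neg h, loopYA_stop xL yL cx cy x h]; omega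

-- sum of a guarded constant over a range
lemma sum_ite_range (s K C : Int) :
    ∀ (n : Nat) (a b : Int), (b - a).toNat = n →
      ((PySem.List.pyRange a b 1).map (fun x => if x + s ≤ K then C else 0)).sum
        = max 0 (min b (K - s + 1) - a) * C := by
  intro n
  induction n with
  | zero =>
      intro a b hn
      rw [PySem.List.pyRange_one_eq_nil (by omega)]
      have : max 0 (min b (K - s + 1) - a) = 0 := by omega
      simp [this]
  | succ k ih =>
      intro a b hn
      rw [PySem.List.pyRange_one_cons (by omega), List.map_cons, List.sum_cons,
          ih (a + 1) b (by omega)]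
      by_cases h : a + s ≤ K
      · rw [if_pos h]
        have h1 : max 0 (min b (K - s + 1) - (a + 1)) = min b (K - s + 1) - (a + 1) := by omega
        have h2 : max 0 (min b (K - s + 1) - a) = min b (K - s + 1) - a := by omega
        rw [h1, h2]; ring
      · rw [if_neg h]
        have h1 : max 0 (min b (K - s + 1) - (a + 1)) = 0 := by omega
        have h2 : max 0 (min b (K - s + 1) - a) = 0 := by omega
        rw [h1, h2]; ring

-- twice the arithmetic-series sum Σ_{c=1}^{L-1} (L - c)
lemma two_mul_tri (L : Int) (h : 1 ≤ L) :
    2 * ((PySem.List.pyRange 1 L 1).map (fun c => L - c)).sum = L * (L - 1) := by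
  induction L, h using Int.le_induction with
  | base => simp [PySem.List.pyRange_one_eq_nil]
  | succ L hL ih =>
      rw [PySem.List.pyRange_one_succ_right (by omega), List.map_append, List.sum_append]
      have he : (fun c => L + 1 - c) = (fun c : Int => (L - c) + 1) := funext fun c => by ring
      rw [he, PySem.List.sum_map_add_int, PySem.List.sum_map_const_int,
          PySem.List.length_pyRange_one]
      have hlen : (((L - 1).toNat : Int)) = L - 1 := by omega
      have ih' := ih
      simp only [List.map_cons, List.map_nil, List.sum_cons, List.sum_nil]
      rw [hlen]
      linear_combination ih'

lemma tri_floordiv (L : Int) (h : 1 ≤ L) :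
    PySem.Int.floordiv (L * (L - 1)) 2
      = ((PySem.List.pyRange 1 L 1).map (fun c => L - c)).sum := by
  have h2 := two_mul_tri L h
  rw [PySem.Int.floordiv_eq_iff_of_pos (by norm_num)]
  constructor <;> linarith

-- the x-loop for fixed cx, cy
lemma xloop_val (xL yL cx cy t : Int) :
    (PySem.List.pyRange 0 (xL - 1) 1).foldl (fun t3 x =>
        loopYA xL yL cx cy x (PySem.List.pyRange 0 (yL - 1) 1) t3) t
      = t + max 0 (min (xL - 1) (xL - cx)) * max 0 (min (yL - 1) (yL - cy)) := by
  rw [show (fun t3 x => loopYA xL yL cx cy x (PySem.List.pyRange 0 (yL - 1) 1) t3)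
        = (fun t3 x => t3 + (if x + cx ≤ xL - 1 then max 0 (min (yL - 1) (yL - cy)) else 0))
      from funext fun t3 => funext fun x => loopYA_val xL yL cx cy x t3]
  rw [PySem.List.foldl_add,
      sum_ite_range cx (xL - 1) (max 0 (min (yL - 1) (yL - cy))) (xL - 1 - 0).toNat 0 (xL - 1) rfl]
  have : min (xL - 1) (xL - 1 - cx + 1) = min (xL - 1) (xL - cx) := by omega
  rw [this]; ring_nf

-- the cy-loop for fixed cx
lemma cyloop_val (xL yL cx t : Int) :
    (PySem.List.pyRange 1 yL 1).foldl (fun t2 cy =>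
      (PySem.List.pyRange 0 (xL - 1) 1).foldl (fun t3 x =>
        loopYA xL yL cx cy x (PySem.List.pyRange 0 (yL - 1) 1) t3) t2) t
      = t + max 0 (min (xL - 1) (xL - cx)) * ((PySem.List.pyRange 1 yL 1).map (fun c => yL - c)).sum := by
  rw [show (fun t2 cy => (PySem.List.pyRange 0 (xL - 1) 1).foldl (fun t3 x =>
        loopYA xL yL cx cy x (PySem.List.pyRange 0 (yL - 1) 1) t3) t2)
        = (fun t2 cy => t2 + max 0 (min (xL - 1) (xL - cx)) * max 0 (min (yL - 1) (yL - cy)))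
      from funext fun t2 => funext fun cy => xloop_val xL yL cx cy t2]
  rw [PySem.List.foldl_add]
  congr 1
  rw [← List.sum_map_mul_left]
  congr 1
  apply List.map_congr_left
  intro cy hcy
  rw [PySem.List.mem_pyRange_one] at hcy
  have : max 0 (min (yL - 1) (yL - cy)) = yL - cy := by omega
  rw [this]

-- A's total as a product of two arithmetic-series sums
lemma A_eq_prod (xL yL : Int) :
    amountOfRectangles xL yL
      = ((PySem.List.pyRange 1 xL 1).map (fun c => xL - c)).sum
        * ((PySem.List.pyRange 1 yL 1).map (fun c => yL - c)).sum := by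
  unfold amountOfRectangles
  rw [show (fun t cx => (PySem.List.pyRange 1 yL 1).foldl (fun t2 cy =>
        (PySem.List.pyRange 0 (xL - 1) 1).foldl (fun t3 x =>
          loopYA xL yL cx cy x (PySem.List.pyRange 0 (yL - 1) 1) t3) t2) t)
        = (fun t cx => t + max 0 (min (xL - 1) (xL - cx))
            * ((PySem.List.pyRange 1 yL 1).map (fun c => yL - c)).sum)
      from funext fun t => funext fun cx => cyloop_val xL yL cx t]
  rw [PySem.List.foldl_add, ← List.sum_map_mul_right]
  rw [zero_add]
  congr 1
  apply List.map_congr_left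
  intro cx hcx
  rw [PySem.List.mem_pyRange_one] at hcx
  have : max 0 (min (xL - 1) (xL - cx)) = xL - cx := by omega
  rw [this]

-- ===== VERDICT (by name: the statement is the Claim_ definition above) =====
theorem amountOfRectangles_spec : Claim_equal_amountOfRectangles := by
  intro xL yL _
  unfold Spec_amountOfRectangles amountOfRectangles_alt
  rw [A_eq_prod]
  by_cases hx : xL < 2
  · rw [if_pos (by simp [hx]), PySem.List.pyRange_one_eq_nil (by omega : xL ≤ 1)]
    simp
  · by_cases hy : yL < 2
    · rw [if_pos (by simp [hy]), PySem.List.pyRange_one_eq_nil (by omega : yL ≤ 1)]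
      simp
    · rw [if_neg (by simp [hx, hy]),
          tri_floordiv xL (by omega), tri_floordiv yL (by omega)]
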